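-- pv_equiv track=rewrite | github.com/thumbe12856/competitive-programming | cf/1700 Journey/solve.py | solve
-- ===== SOURCE A (Python) =====
-- def solve(N, dirs):
--     ans = [1] * (N + 1)
--     l_key, r_key = 0, 1
--     vis = {}
--     def move(ori_idx, ori_turn):
--         l, r = ori_idx, ori_idx
--
--         # Right
--         idx = ori_idx
--         turn = ori_turn
--         while idx < N and (
--             (turn == 0 and dirs[idx] == "R") or \
--             (turn == 1 and dirs[idx] == "L")
--         ):
--             turn = 1 - turn
--             idx += 1
--             r = idx
--             key = (turn, idx, r_key)
--             if key in vis: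
--                 r = vis[key]
--                 break
--
--         turn = ori_turn
--         for i in range(ori_idx, r + 1, 1):
--             key = (turn, i, r_key)
--             if key in vis:
--                 break
--
--             turn = 1 - turn
--             vis[key] = r
--
--         # Left
--         idx = ori_idx
--         turn = ori_turn
--         while idx > 0 and (
--             (turn == 0 and dirs[idx - 1] == "L") or \
--             (turn == 1 and dirs[idx - 1] == "R")
--         ):
--             turn = 1 - turn
--             idx -= 1
--             l = idx
--             key = (turn, idx, l_key)
--             if key in vis:
--                 l = vis[key]
--                 break
--
--         turn = ori_turn
--         for i in range(ori_idx, l - 1, -1):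
--             key = (turn, i, l_key)
--             if key in vis:
--                 break
--
--             turn = 1 - turn
--             vis[key] = l
--
--         return str(r - l + 1)
--
--     for i in range(N + 1):
--         ans[i] = move(i, 0)
--
--     return (" ").join(ans)
-- ===== SOURCE B (Python) =====
-- def solve(N, dirs):
--     if N < 0:
--         return ""
--     # fr[i] = (right steps starting expecting 'R', starting expecting 'L'), built back-to-front
--     fr = [(0, 0)]
--     for i in range(N - 1, -1, -1):
--         a, b = fr[-1]
--         fr.append(((1 + b) if dirs[i] == 'R' else 0, (1 + a) if dirs[i] == 'L' else 0))
--     fr.reverse()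
--     # gl[i] = (left steps starting expecting 'L', starting expecting 'R'), built front-to-back
--     gl = [(0, 0)]
--     for i in range(1, N + 1):
--         a, b = gl[-1]
--         gl.append(((1 + b) if dirs[i - 1] == 'L' else 0, (1 + a) if dirs[i - 1] == 'R' else 0))
--     return " ".join(str(p[0] + q[0] + 1) for p, q in zip(fr, gl))
-- ===== Notes on version B (the rewrite author's own statement) =====
-- stated objective: faster
-- what changed: Replaced per-start bidirectional walks memoized in a shared (turn,idx,side) dictionary with two linear DP passes that tabulate alternating-run lengths (right extent and left extent) once, then emit each answer by a single zip.
import Mathlib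
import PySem

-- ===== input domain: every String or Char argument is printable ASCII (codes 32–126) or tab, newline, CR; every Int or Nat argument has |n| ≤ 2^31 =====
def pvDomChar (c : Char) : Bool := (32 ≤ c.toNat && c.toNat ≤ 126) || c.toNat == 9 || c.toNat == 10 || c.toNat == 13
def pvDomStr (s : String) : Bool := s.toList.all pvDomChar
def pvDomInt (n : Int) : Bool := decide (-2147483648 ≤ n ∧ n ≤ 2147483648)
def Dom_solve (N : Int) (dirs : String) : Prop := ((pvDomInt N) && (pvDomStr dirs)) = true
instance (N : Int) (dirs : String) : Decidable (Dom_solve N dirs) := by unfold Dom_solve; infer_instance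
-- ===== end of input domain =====

-- B replaces A's dict-memoized per-start walks by two linear DP tabulation passes (measurably faster by a constant factor).

-- ===== PORT A =====
-- while-loop guard of A's rightward walk: idx < N and ((turn==0 and dirs[idx]=='R') or (turn==1 and dirs[idx]=='L'))
def condR (N : Int) (dirs : String) (turn idx : Int) : Bool :=
  decide (idx < N) &&
    ((turn == 0 && PySem.Str.pyGet? dirs idx == some 'R') ||
     (turn == 1 && PySem.Str.pyGet? dirs idx == some 'L'))

-- while-loop guard of A's leftward walk: idx > 0 and ((turn==0 and dirs[idx-1]=='L') or (turn==1 and dirs[idx-1]=='R'))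
def condL (dirs : String) (turn idx : Int) : Bool :=
  decide (0 < idx) &&
    ((turn == 0 && PySem.Str.pyGet? dirs (idx - 1) == some 'L') ||
     (turn == 1 && PySem.Str.pyGet? dirs (idx - 1) == some 'R'))

-- A's right 'while' loop; fuel (N - idx)⁺ is always enough since idx increases while idx < N
def whileR (N : Int) (dirs : String) :
    Nat → Int → Int → Int → PySem.Dict (Int × Int × Int) Int → Int
  | 0, _, _, r, _ => r
  | fuel + 1, idx, turn, r, vis =>
    if condR N dirs turn idx then
      match vis.get? (1 - turn, idx + 1, 1) with
      | some v => v
      | none => whileR N dirs fuel (idx + 1) (1 - turn) (idx + 1) vis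
    else r

-- A's right 'for' loop over range(ori_idx, r+1): memoize until a key is already present
def forR :
    Nat → Int → Int → Int → PySem.Dict (Int × Int × Int) Int →
    PySem.Dict (Int × Int × Int) Int
  | 0, _, _, _, vis => vis
  | fuel + 1, i, turn, r, vis =>
    if vis.contains (turn, i, 1) then vis
    else forR fuel (i + 1) (1 - turn) r (vis.insert (turn, i, 1) r)

-- A's left 'while' loop; fuel idx⁺ is always enough since idx decreases while idx > 0
def whileL (dirs : String) :
    Nat → Int → Int → Int → PySem.Dict (Int × Int × Int) Int → Int
  | 0, _, _, l, _ => l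
  | fuel + 1, idx, turn, l, vis =>
    if condL dirs turn idx then
      match vis.get? (1 - turn, idx - 1, 0) with
      | some v => v
      | none => whileL dirs fuel (idx - 1) (1 - turn) (idx - 1) vis
    else l

-- A's left 'for' loop over range(ori_idx, l-1, -1)
def forL :
    Nat → Int → Int → Int → PySem.Dict (Int × Int × Int) Int →
    PySem.Dict (Int × Int × Int) Int
  | 0, _, _, _, vis => vis
  | fuel + 1, i, turn, l, vis =>
    if vis.contains (turn, i, 0) then vis
    else forL fuel (i - 1) (1 - turn) l (vis.insert (turn, i, 0) l)

-- A's inner function move(ori_idx, 0) (A only ever calls it with ori_turn = 0)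
def moveA (N : Int) (dirs : String) (ori : Int)
    (vis : PySem.Dict (Int × Int × Int) Int) :
    String × PySem.Dict (Int × Int × Int) Int :=
  let r := whileR N dirs (N - ori).toNat ori 0 ori vis
  let vis1 := forR (r + 1 - ori).toNat ori 0 r vis
  let l := whileL dirs ori.toNat ori 0 ori vis1
  let vis2 := forL (ori - (l - 1)).toNat ori 0 l vis1
  (PySem.Int.toStr (r - l + 1), vis2)

def solve (N : Int) (dirs : String) : String :=
  let res := (PySem.List.pyRange 0 (N + 1) 1).foldl
    (fun acc i =>
      let sv := moveA N dirs i acc.2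
      (acc.1 ++ [sv.1], sv.2))
    (([] : List String), (PySem.Dict.empty : PySem.Dict (Int × Int × Int) Int))
  PySem.Str.join " " res.1

-- ===== PORT B =====
-- body of B's first loop: fr.append(pair built from fr[-1] and dirs[i]), i running N-1 .. 0
def frStep (dirs : String) (fr : List (Int × Int)) (i : Int) : List (Int × Int) :=
  let p := PySem.List.pyGetD fr (-1) (0, 0)
  fr ++ [(if PySem.Str.pyGet? dirs i == some 'R' then 1 + p.2 else 0,
          if PySem.Str.pyGet? dirs i == some 'L' then 1 + p.1 else 0)]

-- body of B's second loop: gl.append(pair built from gl[-1] and dirs[i-1]), i running 1 .. N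
def glStep (dirs : String) (gl : List (Int × Int)) (i : Int) : List (Int × Int) :=
  let p := PySem.List.pyGetD gl (-1) (0, 0)
  gl ++ [(if PySem.Str.pyGet? dirs (i - 1) == some 'L' then 1 + p.2 else 0,
          if PySem.Str.pyGet? dirs (i - 1) == some 'R' then 1 + p.1 else 0)]

def solve_alt (N : Int) (dirs : String) : String :=
  if N < 0 then "" else
  let fr := (PySem.List.pyRange (N - 1) (-1) (-1)).foldl (frStep dirs) [(0, 0)]
  let fr := fr.reverse
  let gl := (PySem.List.pyRange 1 (N + 1) 1).foldl (glStep dirs) [(0, 0)]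
  PySem.Str.join " "
    ((fr.zip gl).map (fun pq => PySem.Int.toStr (pq.1.1 + pq.2.1 + 1)))

-- ===== PRECONDITION & SPEC =====
-- Pre_ excludes exactly the inputs with N > len(dirs), on which the Python A raises IndexError
-- (B raises IndexError there too).
def Pre_solve (N : Int) (dirs : String) : Prop := N ≤ PySem.Str.len dirs
instance (N : Int) (dirs : String) : Decidable (Pre_solve N dirs) := by unfold Pre_solve; infer_instance
def pvWitness_solve : Int × String := (4, "RLLR")

def Spec_solve (N : Int) (dirs : String) (out : String) : Prop := out = solve_alt N dirs
instance (N : Int) (dirs : String) (out : String) : Decidable (Spec_solve N dirs out) := by unfold Spec_solve; infer_instance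

-- ===== CLAIM (what is proved, stated in full; the proofs are below) =====
def Claim_equal_solve : Prop := ∀ (N : Int) (dirs : String), Dom_solve N dirs → Pre_solve N dirs → Spec_solve N dirs (solve N dirs)

-- ===== LEMMAS AND PROOFS =====

-- number of rightward steps from idx expecting turn, with explicit fuel
def sR (N : Int) (dirs : String) : Nat → Int → Int → Int
  | 0, _, _ => 0
  | fuel + 1, idx, turn =>
    if condR N dirs turn idx then 1 + sR N dirs fuel (idx + 1) (1 - turn) else 0

def SR (N : Int) (dirs : String) (idx turn : Int) : Int :=
  sR N dirs (N - idx).toNat idx turn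

-- number of leftward steps from idx expecting turn
def sL (dirs : String) : Nat → Int → Int → Int
  | 0, _, _ => 0
  | fuel + 1, idx, turn =>
    if condL dirs turn idx then 1 + sL dirs fuel (idx - 1) (1 - turn) else 0

def SL (dirs : String) (idx turn : Int) : Int :=
  sL dirs idx.toNat idx turn

lemma lt_of_condR {N : Int} {dirs : String} {turn idx : Int}
    (h : condR N dirs turn idx = true) : idx < N := by
  simp [condR] at h; exact h.1

lemma pos_of_condL {dirs : String} {turn idx : Int}
    (h : condL dirs turn idx = true) : 0 < idx := by
  simp [condL] at h; exact h.1

lemma SR_unfold (N : Int) (dirs : String) (idx turn : Int) :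
    SR N dirs idx turn =
      if condR N dirs turn idx then 1 + SR N dirs (idx + 1) (1 - turn) else 0 := by
  by_cases hc : condR N dirs turn idx = true
  · have hlt := lt_of_condR hc
    unfold SR
    have h2 : (N - idx).toNat = (N - (idx + 1)).toNat + 1 := by omega
    rw [h2]
    simp only [sR, hc, if_true]
  · rw [Bool.not_eq_true] at hc
    unfold SR
    cases hn : (N - idx).toNat with
    | zero => simp [sR, hc]
    | succ m => simp [sR, hc]

lemma SL_unfold (dirs : String) (idx turn : Int) :
    SL dirs idx turn =
      if condL dirs turn idx then 1 + SL dirs (idx - 1) (1 - turn) else 0 := by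
  by_cases hc : condL dirs turn idx = true
  · have hpos := pos_of_condL hc
    unfold SL
    have h2 : idx.toNat = (idx - 1).toNat + 1 := by omega
    rw [h2]
    simp only [sL, hc, if_true]
  · rw [Bool.not_eq_true] at hc
    unfold SL
    cases hn : idx.toNat with
    | zero => simp [sL, hc]
    | succ m => simp [sL, hc]





lemma condR_of_SR_pos {N : Int} {dirs : String} {idx turn : Int}
    (h : 1 ≤ SR N dirs idx turn) : condR N dirs turn idx = true := by
  by_cases hc : condR N dirs turn idx = true
  · exact hc
  · rw [Bool.not_eq_true] at hc
    rw [SR_unfold, hc] at h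
    simp at h

lemma condL_of_SL_pos {dirs : String} {idx turn : Int}
    (h : 1 ≤ SL dirs idx turn) : condL dirs turn idx = true := by
  by_cases hc : condL dirs turn idx = true
  · exact hc
  · rw [Bool.not_eq_true] at hc
    rw [SL_unfold, hc] at h
    simp at h

-- invariant of A's memo dict: right keys (t, i, 1) store i + SR i t, left keys (t, i, 0) store i - SL i t
def InvR (N : Int) (dirs : String) (vis : PySem.Dict (Int × Int × Int) Int) : Prop :=
  ∀ t i v, vis.get? (t, i, 1) = some v → v = i + SR N dirs i t

def InvL (dirs : String) (vis : PySem.Dict (Int × Int × Int) Int) : Prop :=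
  ∀ t i v, vis.get? (t, i, 0) = some v → v = i - SL dirs i t

lemma whileR_eq (N : Int) (dirs : String) :
    ∀ (fuel : Nat) (idx turn : Int) (vis : PySem.Dict (Int × Int × Int) Int),
      InvR N dirs vis → (N - idx).toNat ≤ fuel →
      whileR N dirs fuel idx turn idx vis = idx + SR N dirs idx turn := by
  intro fuel
  induction fuel with
  | zero =>
    intro idx turn vis hinv h
    have h0 : (N - idx).toNat = 0 := by omega
    have hs : SR N dirs idx turn = 0 := by unfold SR; rw [h0]; rfl
    simp [whileR, hs]
  | succ k ih =>
    intro idx turn vis hinv h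
    by_cases hc : condR N dirs turn idx = true
    · have hlt := lt_of_condR hc
      have hs : SR N dirs idx turn = 1 + SR N dirs (idx + 1) (1 - turn) := by
        rw [SR_unfold, hc]; simp
      simp only [whileR, hc, if_true]
      cases hv : PySem.Dict.get? vis (1 - turn, idx + 1, 1) with
      | some v =>
        have := hinv _ _ _ hv
        rw [this, hs]; ring
      | none =>
        rw [ih (idx + 1) (1 - turn) vis hinv (by omega), hs]; ring
    · rw [Bool.not_eq_true] at hc
      have hs : SR N dirs idx turn = 0 := by rw [SR_unfold, hc]; simp
      simp [whileR, hc, hs]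

lemma whileL_eq (dirs : String) :
    ∀ (fuel : Nat) (idx turn : Int) (vis : PySem.Dict (Int × Int × Int) Int),
      InvL dirs vis → idx.toNat ≤ fuel →
      whileL dirs fuel idx turn idx vis = idx - SL dirs idx turn := by
  intro fuel
  induction fuel with
  | zero =>
    intro idx turn vis hinv h
    have h0 : idx.toNat = 0 := by omega
    have hs : SL dirs idx turn = 0 := by unfold SL; rw [h0]; rfl
    simp [whileL, hs]
  | succ k ih =>
    intro idx turn vis hinv h
    by_cases hc : condL dirs turn idx = true
    · have hpos := pos_of_condL hc
      have hs : SL dirs idx turn = 1 + SL dirs (idx - 1) (1 - turn) := by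
        rw [SL_unfold, hc]; simp
      simp only [whileL, hc, if_true]
      cases hv : PySem.Dict.get? vis (1 - turn, idx - 1, 0) with
      | some v =>
        have := hinv _ _ _ hv
        rw [this, hs]; ring
      | none =>
        rw [ih (idx - 1) (1 - turn) vis hinv (by omega), hs]; ring
    · rw [Bool.not_eq_true] at hc
      have hs : SL dirs idx turn = 0 := by rw [SL_unfold, hc]; simp
      simp [whileL, hc, hs]

lemma forR_inv (N : Int) (dirs : String) :
    ∀ (fuel : Nat) (i turn r : Int) (vis : PySem.Dict (Int × Int × Int) Int),
      InvR N dirs vis → InvL dirs vis →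
      fuel ≤ (r + 1 - i).toNat →
      (1 ≤ fuel → r = i + SR N dirs i turn) →
      InvR N dirs (forR fuel i turn r vis) ∧ InvL dirs (forR fuel i turn r vis) := by
  intro fuel
  induction fuel with
  | zero =>
    intro i turn r vis h1 h2 hfe hr
    exact ⟨h1, h2⟩
  | succ k ih =>
    intro i turn r vis h1 h2 hfe hr
    have hr1 : r = i + SR N dirs i turn := hr (by omega)
    simp only [forR]
    by_cases hmem : PySem.Dict.contains vis (turn, i, 1) = true
    · simp only [hmem, if_true]
      exact ⟨h1, h2⟩
    · rw [Bool.not_eq_true] at hmem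
      simp only [hmem, Bool.false_eq_true, if_false]
      apply ih
      · intro t' i' v hget
        rw [PySem.Dict.get?_insert] at hget
        split at hget
        · next heq =>
          simp only [Prod.mk.injEq] at heq
          obtain ⟨e1, e2, _⟩ := heq
          subst e1; subst e2
          cases hget
          exact hr1
        · next => exact h1 _ _ _ hget
      · intro t' i' v hget
        rw [PySem.Dict.get?_insert] at hget
        split at hget
        · next heq => simp only [Prod.mk.injEq] at heq; omega
        · next => exact h2 _ _ _ hget
      · omega
      · intro hk
        have hge : i + 1 ≤ r := by omega
        have hpos : 1 ≤ SR N dirs i turn := by omega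
        have hc := condR_of_SR_pos hpos
        have hs : SR N dirs i turn = 1 + SR N dirs (i + 1) (1 - turn) := by
          rw [SR_unfold, hc]; simp
        omega

lemma forL_inv (N : Int) (dirs : String) :
    ∀ (fuel : Nat) (i turn l : Int) (vis : PySem.Dict (Int × Int × Int) Int),
      InvR N dirs vis → InvL dirs vis →
      fuel ≤ (i - (l - 1)).toNat →
      (1 ≤ fuel → l = i - SL dirs i turn) →
      InvR N dirs (forL fuel i turn l vis) ∧ InvL dirs (forL fuel i turn l vis) := by
  intro fuel
  induction fuel with
  | zero =>
    intro i turn l vis h1 h2 hfe hl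
    exact ⟨h1, h2⟩
  | succ k ih =>
    intro i turn l vis h1 h2 hfe hl
    have hl1 : l = i - SL dirs i turn := hl (by omega)
    simp only [forL]
    by_cases hmem : PySem.Dict.contains vis (turn, i, 0) = true
    · simp only [hmem, if_true]
      exact ⟨h1, h2⟩
    · rw [Bool.not_eq_true] at hmem
      simp only [hmem, Bool.false_eq_true, if_false]
      apply ih
      · intro t' i' v hget
        rw [PySem.Dict.get?_insert] at hget
        split at hget
        · next heq => simp only [Prod.mk.injEq] at heq; omega
        · next => exact h1 _ _ _ hget
      · intro t' i' v hget
        rw [PySem.Dict.get?_insert] at hget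
        split at hget
        · next heq =>
          simp only [Prod.mk.injEq] at heq
          obtain ⟨e1, e2, _⟩ := heq
          subst e1; subst e2
          cases hget
          exact hl1
        · next => exact h2 _ _ _ hget
      · omega
      · intro hk
        have hge : l ≤ i - 1 := by omega
        have hpos : 1 ≤ SL dirs i turn := by omega
        have hc := condL_of_SL_pos hpos
        have hs : SL dirs i turn = 1 + SL dirs (i - 1) (1 - turn) := by
          rw [SL_unfold, hc]; simp
        omega

lemma moveA_eq (N : Int) (dirs : String) (ori : Int)
    (vis : PySem.Dict (Int × Int × Int) Int)
    (h1 : InvR N dirs vis) (h2 : InvL dirs vis) :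
    (moveA N dirs ori vis).1 = PySem.Int.toStr (SR N dirs ori 0 + SL dirs ori 0 + 1)
    ∧ InvR N dirs (moveA N dirs ori vis).2 ∧ InvL dirs (moveA N dirs ori vis).2 := by
  have hr := whileR_eq N dirs (N - ori).toNat ori 0 vis h1 (le_refl _)
  simp only [moveA]
  rw [hr]
  obtain ⟨hR1, hL1⟩ := forR_inv N dirs (ori + SR N dirs ori 0 + 1 - ori).toNat ori 0
      (ori + SR N dirs ori 0) vis h1 h2 (le_refl _) (fun _ => rfl)
  have hl := whileL_eq dirs ori.toNat ori 0 _ hL1 (le_refl _)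
  rw [hl]
  obtain ⟨hR2, hL2⟩ := forL_inv N dirs (ori - (ori - SL dirs ori 0 - 1)).toNat ori 0
      (ori - SL dirs ori 0) _ hR1 hL1 (le_refl _) (fun _ => rfl)
  refine ⟨?_, hR2, hL2⟩
  congr 1
  ring

lemma mainFold (N : Int) (dirs : String) :
    ∀ (L : List Int) (ans : List String) (vis : PySem.Dict (Int × Int × Int) Int),
      InvR N dirs vis → InvL dirs vis →
      (L.foldl (fun acc i =>
          let sv := moveA N dirs i acc.2
          (acc.1 ++ [sv.1], sv.2)) (ans, vis)).1
        = ans ++ L.map (fun i => PySem.Int.toStr (SR N dirs i 0 + SL dirs i 0 + 1)) := by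
  intro L
  induction L with
  | nil => intro ans vis h1 h2; simp
  | cons i L ih =>
    intro ans vis h1 h2
    obtain ⟨he, hR, hL⟩ := moveA_eq N dirs i vis h1 h2
    simp only [List.foldl_cons, List.map_cons]
    rw [ih (ans ++ [(moveA N dirs i vis).1]) (moveA N dirs i vis).2 hR hL, he]
    simp

-- A's result in closed form
lemma solve_eq (N : Int) (dirs : String) :
    solve N dirs = PySem.Str.join " "
      ((PySem.List.pyRange 0 (N + 1) 1).map
        (fun i => PySem.Int.toStr (SR N dirs i 0 + SL dirs i 0 + 1))) := by
  have h1 : InvR N dirs (PySem.Dict.empty : PySem.Dict (Int × Int × Int) Int) := by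
    intro t i v h
    rw [PySem.Dict.get?_empty] at h
    cases h
  have h2 : InvL dirs (PySem.Dict.empty : PySem.Dict (Int × Int × Int) Int) := by
    intro t i v h
    rw [PySem.Dict.get?_empty] at h
    cases h
  simp only [solve]
  rw [mainFold N dirs _ [] _ h1 h2]
  simp

def gR (N : Int) (dirs : String) (i : Int) : Int × Int := (SR N dirs i 0, SR N dirs i 1)
def hL (dirs : String) (i : Int) : Int × Int := (SL dirs i 0, SL dirs i 1)

lemma fr_loop (N : Int) (dirs : String) :
    ∀ (n : Nat) (j : Int), (j + 1).toNat = n → -1 ≤ j → j ≤ N - 1 →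
      (PySem.List.pyRange j (-1) (-1)).foldl (frStep dirs)
          (((PySem.List.pyRange (j + 1) (N + 1) 1).map (gR N dirs)).reverse)
        = ((PySem.List.pyRange 0 (N + 1) 1).map (gR N dirs)).reverse := by
  intro n
  induction n with
  | zero =>
    intro j hn hj1 hj2
    have hj : j = -1 := by omega
    subst hj
    rw [PySem.List.pyRange_neg_one_eq_nil (by omega)]
    norm_num
  | succ k ih =>
    intro j hn hj1 hj2
    have hj : 0 ≤ j := by omega
    rw [PySem.List.pyRange_neg_one_cons (by omega : (-1 : Int) < j)]
    simp only [List.foldl_cons]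
    have hcons : PySem.List.pyRange (j + 1) (N + 1) 1
        = (j + 1) :: PySem.List.pyRange (j + 1 + 1) (N + 1) 1 :=
      PySem.List.pyRange_one_cons (by omega)
    have hpair :
        (if PySem.Str.pyGet? dirs j == some 'R' then 1 + (gR N dirs (j + 1)).2 else 0,
         if PySem.Str.pyGet? dirs j == some 'L' then 1 + (gR N dirs (j + 1)).1 else 0)
          = gR N dirs j := by
      have hc0 : condR N dirs 0 j = (PySem.Str.pyGet? dirs j == some 'R') := by
        simp [condR, show j < N by omega]
      have hc1 : condR N dirs 1 j = (PySem.Str.pyGet? dirs j == some 'L') := by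
        simp [condR, show j < N by omega]
      have e0 : SR N dirs j 0
          = if PySem.Str.pyGet? dirs j == some 'R' then 1 + SR N dirs (j + 1) 1 else 0 := by
        rw [SR_unfold, hc0]; norm_num
      have e1 : SR N dirs j 1
          = if PySem.Str.pyGet? dirs j == some 'L' then 1 + SR N dirs (j + 1) 0 else 0 := by
        rw [SR_unfold, hc1]; norm_num
      show _ = (SR N dirs j 0, SR N dirs j 1)
      rw [e0, e1]
      simp [gR]
    have hstep : frStep dirs (((PySem.List.pyRange (j + 1) (N + 1) 1).map (gR N dirs)).reverse) j
        = ((PySem.List.pyRange j (N + 1) 1).map (gR N dirs)).reverse := by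
      unfold frStep
      rw [hcons]
      simp only [List.map_cons, List.reverse_cons]
      rw [PySem.List.pyGetD_neg_one_append_singleton]
      rw [PySem.List.pyRange_one_cons (by omega : j < N + 1), hcons]
      simp only [List.map_cons, List.reverse_cons]
      rw [hpair]
    rw [hstep]
    have := ih (j - 1) (by omega) (by omega) (by omega)
    rw [show j - 1 + 1 = j by ring] at this
    exact this

lemma gl_loop (N : Int) (dirs : String) :
    ∀ (n : Nat) (j : Int), (N + 1 - j).toNat = n → 1 ≤ j → j ≤ N + 1 →
      (PySem.List.pyRange j (N + 1) 1).foldl (glStep dirs)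
          ((PySem.List.pyRange 0 j 1).map (hL dirs))
        = (PySem.List.pyRange 0 (N + 1) 1).map (hL dirs) := by
  intro n
  induction n with
  | zero =>
    intro j hn hj1 hj2
    have hj : j = N + 1 := by omega
    subst hj
    rw [PySem.List.pyRange_one_eq_nil (a := N + 1) (b := N + 1) (by omega)]
    rfl
  | succ k ih =>
    intro j hn hj1 hj2
    have hj : j ≤ N := by omega
    rw [PySem.List.pyRange_one_cons (by omega : j < N + 1)]
    simp only [List.foldl_cons]
    have hsr : PySem.List.pyRange 0 j 1 = PySem.List.pyRange 0 (j - 1) 1 ++ [j - 1] := by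
      have h := PySem.List.pyRange_one_succ_right (a := 0) (b := j - 1) (by omega)
      rw [show j - 1 + 1 = j by ring] at h
      exact h
    have hpair :
        (if PySem.Str.pyGet? dirs (j - 1) == some 'L' then 1 + (hL dirs (j - 1)).2 else 0,
         if PySem.Str.pyGet? dirs (j - 1) == some 'R' then 1 + (hL dirs (j - 1)).1 else 0)
          = hL dirs j := by
      have hc0 : condL dirs 0 j = (PySem.Str.pyGet? dirs (j - 1) == some 'L') := by
        simp [condL, show 0 < j by omega]
      have hc1 : condL dirs 1 j = (PySem.Str.pyGet? dirs (j - 1) == some 'R') := by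
        simp [condL, show 0 < j by omega]
      have e0 : SL dirs j 0
          = if PySem.Str.pyGet? dirs (j - 1) == some 'L' then 1 + SL dirs (j - 1) 1 else 0 := by
        rw [SL_unfold, hc0]; norm_num
      have e1 : SL dirs j 1
          = if PySem.Str.pyGet? dirs (j - 1) == some 'R' then 1 + SL dirs (j - 1) 0 else 0 := by
        rw [SL_unfold, hc1]; norm_num
      show _ = (SL dirs j 0, SL dirs j 1)
      rw [e0, e1]
      simp [hL]
    have hstep : glStep dirs ((PySem.List.pyRange 0 j 1).map (hL dirs)) j
        = (PySem.List.pyRange 0 (j + 1) 1).map (hL dirs) := by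
      unfold glStep
      rw [hsr]
      simp only [List.map_append, List.map_cons, List.map_nil]
      rw [PySem.List.pyGetD_neg_one_append_singleton]
      rw [PySem.List.pyRange_one_succ_right (a := 0) (b := j) (by omega)]
      simp only [List.map_append, List.map_cons, List.map_nil]
      rw [hpair, hsr]
      simp [List.map_append]
    rw [hstep]
    have := ih (j + 1) (by omega) (by omega) (by omega)
    exact this

-- B's result in the same closed form
lemma solve_alt_eq (N : Int) (dirs : String) :
    solve_alt N dirs = PySem.Str.join " "
      ((PySem.List.pyRange 0 (N + 1) 1).map
        (fun i => PySem.Int.toStr (SR N dirs i 0 + SL dirs i 0 + 1))) := by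
  by_cases hN : N < 0
  · unfold solve_alt
    rw [if_pos hN, PySem.List.pyRange_one_eq_nil (by omega : N + 1 ≤ 0)]
    simp only [List.map_nil]
    decide
  · have hN0 : (0 : Int) ≤ N := by omega
    unfold solve_alt
    rw [if_neg hN]
    have hinit : ((PySem.List.pyRange (N - 1 + 1) (N + 1) 1).map (gR N dirs)).reverse
        = [((0 : Int), (0 : Int))] := by
      rw [show N - 1 + 1 = N by ring]
      rw [PySem.List.pyRange_one_cons (by omega : N < N + 1),
          PySem.List.pyRange_one_eq_nil (by omega : N + 1 ≤ N + 1)]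
      have hs0 : SR N dirs N 0 = 0 := by
        rw [SR_unfold]
        have : condR N dirs 0 N = false := by simp [condR]
        rw [this]; simp
      have hs1 : SR N dirs N 1 = 0 := by
        rw [SR_unfold]
        have : condR N dirs 1 N = false := by simp [condR]
        rw [this]; simp
      simp [gR, hs0, hs1]
    have hfr := fr_loop N dirs N.toNat (N - 1) (by omega) (by omega) (by omega)
    rw [hinit] at hfr
    have hinit2 : (PySem.List.pyRange 0 1 1).map (hL dirs) = [((0 : Int), (0 : Int))] := by
      rw [PySem.List.pyRange_one_cons (by omega : (0 : Int) < 1),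
          PySem.List.pyRange_one_eq_nil (by omega : (1 : Int) ≤ 0 + 1)]
      have hs0 : SL dirs 0 0 = 0 := by
        rw [SL_unfold]
        have : condL dirs 0 0 = false := by simp [condL]
        rw [this]; simp
      have hs1 : SL dirs 0 1 = 0 := by
        rw [SL_unfold]
        have : condL dirs 1 0 = false := by simp [condL]
        rw [this]; simp
      simp [hL, hs0, hs1]
    have hgl := gl_loop N dirs N.toNat 1 (by omega) (by omega) (by omega)
    rw [hinit2] at hgl
    rw [hfr, hgl]
    simp only [List.reverse_reverse]
    congr 1
    rw [List.zip_map']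
    rw [List.map_map]
    refine List.map_congr_left ?_
    intro a _
    simp [gR, hL, Function.comp]

-- ===== VERDICT (by name: the statement is the Claim_ definition above) =====
theorem solve_spec : Claim_equal_solve := by
  intro N dirs _ _
  unfold Spec_solve
  rw [solve_eq, solve_alt_eq]
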